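-- pv_equiv track=rewrite | github.com/try-works/recursive-mode | scripts/recursive-status.py | get_phase_owned_actual_changed_files
-- ===== SOURCE A (Python) =====
-- PRODUCT_DIFF_PHASE_FILES = {"03-implementation-summary.md", "03.5-code-review.md", "04-test-summary.md"}
--
-- DECISIONS_DIFF_PHASE_FILES = {"06-decisions-update.md"}
--
-- STATE_DIFF_PHASE_FILES = {"07-state-update.md"}
--
-- MEMORY_DIFF_PHASE_FILES = {"08-memory-impact.md"}
--
-- def get_phase_owned_actual_changed_files(file_name: str, actual_changed_files: list[str] | None) -> list[str] | None:
--     if actual_changed_files is None: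
--         return None
--     if file_name == "02-to-be-plan.md":
--         return None
--
--     owned_paths: list[str] = []
--     for path in actual_changed_files:
--         if path == ".recursive/DECISIONS.md":
--             if file_name in DECISIONS_DIFF_PHASE_FILES:
--                 owned_paths.append(path)
--             continue
--         if path == ".recursive/STATE.md":
--             if file_name in STATE_DIFF_PHASE_FILES:
--                 owned_paths.append(path)
--             continue
--         if path.startswith(".recursive/memory/"):
--             if file_name in MEMORY_DIFF_PHASE_FILES:
--                 owned_paths.append(path)
--             continue
--         owned_paths.append(path)
--
--     if file_name in PRODUCT_DIFF_PHASE_FILES: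
--         return owned_paths
--     if file_name in DECISIONS_DIFF_PHASE_FILES | STATE_DIFF_PHASE_FILES | MEMORY_DIFF_PHASE_FILES:
--         return owned_paths
--     return None
-- ===== SOURCE B (Python) =====
-- _ALL_PHASE_FILES = (
--     "03-implementation-summary.md", "03.5-code-review.md", "04-test-summary.md",
--     "06-decisions-update.md", "07-state-update.md", "08-memory-impact.md",
-- )
--
--
-- def _drop_eq(paths, name):
--     return [p for p in paths if p != name]
--
--
-- def _drop_memory(paths):
--     return [p for p in paths if not p.startswith(".recursive/memory/")]
--
--
-- def get_phase_owned_actual_changed_files(file_name: str, actual_changed_files: list[str] | None) -> list[str] | None: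
--     if actual_changed_files is None or file_name not in _ALL_PHASE_FILES:
--         return None
--     # Staged passes: strip each phase-owned category unless file_name is its owner.
--     out = list(actual_changed_files)
--     if file_name != "06-decisions-update.md":
--         out = _drop_eq(out, ".recursive/DECISIONS.md")
--     if file_name != "07-state-update.md":
--         out = _drop_eq(out, ".recursive/STATE.md")
--     if file_name != "08-memory-impact.md":
--         out = _drop_memory(out)
--     return out
-- ===== Notes on version B (the rewrite author's own statement) =====
-- stated objective: alternative
-- what changed: Instead of A's single classify-per-path loop with three ownership membership tests and per-element appends, B gates on the six phase names up front (returning None otherwise, which subsumes the '02-to-be-plan.md' guard) and then applies up to three independent staged removal passes, each conditionally stripping one phase-owned category (DECISIONS.md, STATE.md, memory/*) unless file_name is that category's owner.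
import Mathlib
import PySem

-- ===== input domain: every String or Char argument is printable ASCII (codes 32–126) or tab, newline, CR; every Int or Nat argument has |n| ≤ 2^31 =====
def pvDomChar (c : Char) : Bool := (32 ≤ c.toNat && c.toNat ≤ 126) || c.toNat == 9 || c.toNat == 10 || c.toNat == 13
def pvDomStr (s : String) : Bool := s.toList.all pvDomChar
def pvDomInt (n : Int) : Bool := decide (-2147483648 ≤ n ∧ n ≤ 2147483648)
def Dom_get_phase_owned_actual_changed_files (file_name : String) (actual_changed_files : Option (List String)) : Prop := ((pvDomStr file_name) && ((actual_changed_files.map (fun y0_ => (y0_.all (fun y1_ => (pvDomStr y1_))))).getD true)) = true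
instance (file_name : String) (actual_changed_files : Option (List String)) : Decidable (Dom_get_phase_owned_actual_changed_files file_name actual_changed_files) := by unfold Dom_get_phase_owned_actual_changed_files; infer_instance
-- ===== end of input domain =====

-- B replaces A's single classify-per-path loop (with membership tests inside) by an up-front gate
-- on the six phase names (returning none otherwise, subsuming the '02' guard) followed by up to
-- three staged removal passes, one per phase-owned category; objective: alternative decomposition.

-- ===== PORT A =====
def PRODUCT_DIFF_PHASE_FILES : PySem.Set String :=
  PySem.Set.ofList ["03-implementation-summary.md", "03.5-code-review.md", "04-test-summary.md"]
def DECISIONS_DIFF_PHASE_FILES : PySem.Set String := PySem.Set.ofList ["06-decisions-update.md"]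
def STATE_DIFF_PHASE_FILES : PySem.Set String := PySem.Set.ofList ["07-state-update.md"]
def MEMORY_DIFF_PHASE_FILES : PySem.Set String := PySem.Set.ofList ["08-memory-impact.md"]

def get_phase_owned_actual_changed_files (file_name : String) (actual_changed_files : Option (List String)) : Option (List String) :=
  match actual_changed_files with
  | none => none
  | some files =>
    if file_name = "02-to-be-plan.md" then none
    else
      let owned_paths : List String := files.foldl (fun acc path =>
        if path = ".recursive/DECISIONS.md" then
          (if PySem.Set.contains DECISIONS_DIFF_PHASE_FILES file_name then acc ++ [path] else acc)
        else if path = ".recursive/STATE.md" then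
          (if PySem.Set.contains STATE_DIFF_PHASE_FILES file_name then acc ++ [path] else acc)
        else if PySem.Str.startswith path ".recursive/memory/" then
          (if PySem.Set.contains MEMORY_DIFF_PHASE_FILES file_name then acc ++ [path] else acc)
        else acc ++ [path]) []
      if PySem.Set.contains PRODUCT_DIFF_PHASE_FILES file_name then some owned_paths
      else if PySem.Set.contains
          (PySem.Set.union (PySem.Set.union DECISIONS_DIFF_PHASE_FILES STATE_DIFF_PHASE_FILES) MEMORY_DIFF_PHASE_FILES)
          file_name then some owned_paths
      else none

-- ===== PORT B =====
def pvAllPhaseFiles : List String :=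
  ["03-implementation-summary.md", "03.5-code-review.md", "04-test-summary.md",
   "06-decisions-update.md", "07-state-update.md", "08-memory-impact.md"]

def pvDropEq (paths : List String) (name : String) : List String :=
  paths.filter (fun p => !(p == name))

def pvDropMemory (paths : List String) : List String :=
  paths.filter (fun p => !(PySem.Str.startswith p ".recursive/memory/"))

def get_phase_owned_actual_changed_files_alt (file_name : String) (actual_changed_files : Option (List String)) : Option (List String) :=
  match actual_changed_files with
  | none => none
  | some files =>
    if !(pvAllPhaseFiles.contains file_name) then none
    else
      let out := files
      let out := if file_name ≠ "06-decisions-update.md" then pvDropEq out ".recursive/DECISIONS.md" else out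
      let out := if file_name ≠ "07-state-update.md" then pvDropEq out ".recursive/STATE.md" else out
      let out := if file_name ≠ "08-memory-impact.md" then pvDropMemory out else out
      some out

-- ===== PRECONDITION & SPEC =====
def Spec_get_phase_owned_actual_changed_files (file_name : String) (actual_changed_files : Option (List String)) (out : Option (List String)) : Prop := out = get_phase_owned_actual_changed_files_alt file_name actual_changed_files
instance (file_name : String) (actual_changed_files : Option (List String)) (out : Option (List String)) : Decidable (Spec_get_phase_owned_actual_changed_files file_name actual_changed_files out) := by unfold Spec_get_phase_owned_actual_changed_files; infer_instance

-- ===== CLAIM (what is proved, stated in full; the proofs are below) =====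
def Claim_equal_get_phase_owned_actual_changed_files : Prop := ∀ (file_name : String) (actual_changed_files : Option (List String)), Dom_get_phase_owned_actual_changed_files file_name actual_changed_files → Spec_get_phase_owned_actual_changed_files file_name actual_changed_files (get_phase_owned_actual_changed_files file_name actual_changed_files)

-- ===== LEMMAS AND PROOFS =====

-- A's accumulator loop over the paths is the single filter by the three-way classification.
theorem pvLoop_eq_filter (fn : String) :
    ∀ (files : List String) (acc : List String),
      files.foldl (fun acc path =>
        if path = ".recursive/DECISIONS.md" then
          (if PySem.Set.contains DECISIONS_DIFF_PHASE_FILES fn then acc ++ [path] else acc)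
        else if path = ".recursive/STATE.md" then
          (if PySem.Set.contains STATE_DIFF_PHASE_FILES fn then acc ++ [path] else acc)
        else if PySem.Str.startswith path ".recursive/memory/" then
          (if PySem.Set.contains MEMORY_DIFF_PHASE_FILES fn then acc ++ [path] else acc)
        else acc ++ [path]) acc
      = acc ++ files.filter (fun p =>
          if p == ".recursive/DECISIONS.md" then PySem.Set.contains DECISIONS_DIFF_PHASE_FILES fn
          else if p == ".recursive/STATE.md" then PySem.Set.contains STATE_DIFF_PHASE_FILES fn
          else if PySem.Str.startswith p ".recursive/memory/" then PySem.Set.contains MEMORY_DIFF_PHASE_FILES fn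
          else true) := by
  intro files
  induction files with
  | nil => intro acc; simp
  | cons p rest ih =>
    intro acc
    rw [List.foldl_cons, ih]
    simp only [List.filter_cons]
    by_cases h1 : p = ".recursive/DECISIONS.md"
    · by_cases hf : fn ∈ DECISIONS_DIFF_PHASE_FILES <;> simp [h1, hf]
    · by_cases h2 : p = ".recursive/STATE.md"
      · by_cases hf : fn ∈ STATE_DIFF_PHASE_FILES <;> simp [h1, h2, hf]
      · by_cases h3 : PySem.Chars.startswith p.toList
            ['.','r','e','c','u','r','s','i','v','e','/','m','e','m','o','r','y','/'] = true
        · by_cases hf : fn ∈ MEMORY_DIFF_PHASE_FILES <;> simp [h1, h2, h3, hf]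
        · simp [h1, h2, h3]

-- ===== VERDICT (by name: the statement is the Claim_ definition above) =====
set_option maxHeartbeats 1000000 in
theorem get_phase_owned_actual_changed_files_spec : Claim_equal_get_phase_owned_actual_changed_files := by
  intro fn acf _
  unfold Spec_get_phase_owned_actual_changed_files
  cases acf with
  | none => rfl
  | some files =>
    by_cases h0 : fn = "03-implementation-summary.md"
    · subst h0
      rw [get_phase_owned_actual_changed_files, get_phase_owned_actual_changed_files_alt]
      rw [pvLoop_eq_filter]
      simp only [pvAllPhaseFiles, pvDropEq, pvDropMemory, List.filter_filter, List.nil_append,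
        String.reduceEq, List.contains_cons, List.elem_nil, Bool.or_false, Bool.true_or, Bool.false_or,
        beq_self_eq_true, reduceIte, Bool.not_true, Bool.not_false, ne_eq, not_true, not_false_iff,
        ite_true, ite_false]
      norm_num
      rw [if_pos (by decide : ("03-implementation-summary.md" ∈ PRODUCT_DIFF_PHASE_FILES))]
      congr 1
      apply List.filter_congr
      intro p _
      by_cases h1 : p = ".recursive/DECISIONS.md"
      · subst h1; decide
      · by_cases h2 : p = ".recursive/STATE.md"
        · subst h2; decide
        · by_cases h3 : PySem.Chars.startswith p.toList ['.','r','e','c','u','r','s','i','v','e','/','m','e','m','o','r','y','/'] = true <;>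
            simp [h1, h2, h3, show ¬("03-implementation-summary.md" ∈ DECISIONS_DIFF_PHASE_FILES) from by decide, show ¬("03-implementation-summary.md" ∈ STATE_DIFF_PHASE_FILES) from by decide, show ¬("03-implementation-summary.md" ∈ MEMORY_DIFF_PHASE_FILES) from by decide]
    by_cases h1 : fn = "03.5-code-review.md"
    · subst h1
      rw [get_phase_owned_actual_changed_files, get_phase_owned_actual_changed_files_alt]
      rw [pvLoop_eq_filter]
      simp only [pvAllPhaseFiles, pvDropEq, pvDropMemory, List.filter_filter, List.nil_append,
        String.reduceEq, List.contains_cons, List.elem_nil, Bool.or_false, Bool.true_or, Bool.false_or,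
        beq_self_eq_true, reduceIte, Bool.not_true, Bool.not_false, ne_eq, not_true, not_false_iff,
        ite_true, ite_false]
      norm_num
      rw [if_pos (by decide : ("03.5-code-review.md" ∈ PRODUCT_DIFF_PHASE_FILES))]
      congr 1
      apply List.filter_congr
      intro p _
      by_cases h1 : p = ".recursive/DECISIONS.md"
      · subst h1; decide
      · by_cases h2 : p = ".recursive/STATE.md"
        · subst h2; decide
        · by_cases h3 : PySem.Chars.startswith p.toList ['.','r','e','c','u','r','s','i','v','e','/','m','e','m','o','r','y','/'] = true <;>
            simp [h1, h2, h3, show ¬("03.5-code-review.md" ∈ DECISIONS_DIFF_PHASE_FILES) from by decide, show ¬("03.5-code-review.md" ∈ STATE_DIFF_PHASE_FILES) from by decide, show ¬("03.5-code-review.md" ∈ MEMORY_DIFF_PHASE_FILES) from by decide]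
    by_cases h2 : fn = "04-test-summary.md"
    · subst h2
      rw [get_phase_owned_actual_changed_files, get_phase_owned_actual_changed_files_alt]
      rw [pvLoop_eq_filter]
      simp only [pvAllPhaseFiles, pvDropEq, pvDropMemory, List.filter_filter, List.nil_append,
        String.reduceEq, List.contains_cons, List.elem_nil, Bool.or_false, Bool.true_or, Bool.false_or,
        beq_self_eq_true, reduceIte, Bool.not_true, Bool.not_false, ne_eq, not_true, not_false_iff,
        ite_true, ite_false]
      norm_num
      rw [if_pos (by decide : ("04-test-summary.md" ∈ PRODUCT_DIFF_PHASE_FILES))]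
      congr 1
      apply List.filter_congr
      intro p _
      by_cases h1 : p = ".recursive/DECISIONS.md"
      · subst h1; decide
      · by_cases h2 : p = ".recursive/STATE.md"
        · subst h2; decide
        · by_cases h3 : PySem.Chars.startswith p.toList ['.','r','e','c','u','r','s','i','v','e','/','m','e','m','o','r','y','/'] = true <;>
            simp [h1, h2, h3, show ¬("04-test-summary.md" ∈ DECISIONS_DIFF_PHASE_FILES) from by decide, show ¬("04-test-summary.md" ∈ STATE_DIFF_PHASE_FILES) from by decide, show ¬("04-test-summary.md" ∈ MEMORY_DIFF_PHASE_FILES) from by decide]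
    by_cases h3 : fn = "06-decisions-update.md"
    · subst h3
      rw [get_phase_owned_actual_changed_files, get_phase_owned_actual_changed_files_alt]
      rw [pvLoop_eq_filter]
      simp only [pvAllPhaseFiles, pvDropEq, pvDropMemory, List.filter_filter, List.nil_append,
        String.reduceEq, List.contains_cons, List.elem_nil, Bool.or_false, Bool.true_or, Bool.false_or,
        beq_self_eq_true, reduceIte, Bool.not_true, Bool.not_false, ne_eq, not_true, not_false_iff,
        ite_true, ite_false]
      norm_num
      rw [if_neg (by decide : ¬("06-decisions-update.md" ∈ PRODUCT_DIFF_PHASE_FILES)),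
          if_pos (by decide : (("06-decisions-update.md" ∈ DECISIONS_DIFF_PHASE_FILES ∨ "06-decisions-update.md" ∈ STATE_DIFF_PHASE_FILES) ∨ "06-decisions-update.md" ∈ MEMORY_DIFF_PHASE_FILES))]
      congr 1
      apply List.filter_congr
      intro p _
      by_cases h1 : p = ".recursive/DECISIONS.md"
      · subst h1; decide
      · by_cases h2 : p = ".recursive/STATE.md"
        · subst h2; decide
        · by_cases h3 : PySem.Chars.startswith p.toList ['.','r','e','c','u','r','s','i','v','e','/','m','e','m','o','r','y','/'] = true <;>
            simp [h1, h2, h3, show ("06-decisions-update.md" ∈ DECISIONS_DIFF_PHASE_FILES) from by decide, show ¬("06-decisions-update.md" ∈ STATE_DIFF_PHASE_FILES) from by decide, show ¬("06-decisions-update.md" ∈ MEMORY_DIFF_PHASE_FILES) from by decide]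
    by_cases h4 : fn = "07-state-update.md"
    · subst h4
      rw [get_phase_owned_actual_changed_files, get_phase_owned_actual_changed_files_alt]
      rw [pvLoop_eq_filter]
      simp only [pvAllPhaseFiles, pvDropEq, pvDropMemory, List.filter_filter, List.nil_append,
        String.reduceEq, List.contains_cons, List.elem_nil, Bool.or_false, Bool.true_or, Bool.false_or,
        beq_self_eq_true, reduceIte, Bool.not_true, Bool.not_false, ne_eq, not_true, not_false_iff,
        ite_true, ite_false]
      norm_num
      rw [if_neg (by decide : ¬("07-state-update.md" ∈ PRODUCT_DIFF_PHASE_FILES)),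
          if_pos (by decide : (("07-state-update.md" ∈ DECISIONS_DIFF_PHASE_FILES ∨ "07-state-update.md" ∈ STATE_DIFF_PHASE_FILES) ∨ "07-state-update.md" ∈ MEMORY_DIFF_PHASE_FILES))]
      congr 1
      apply List.filter_congr
      intro p _
      by_cases h1 : p = ".recursive/DECISIONS.md"
      · subst h1; decide
      · by_cases h2 : p = ".recursive/STATE.md"
        · subst h2; decide
        · by_cases h3 : PySem.Chars.startswith p.toList ['.','r','e','c','u','r','s','i','v','e','/','m','e','m','o','r','y','/'] = true <;>
            simp [h1, h2, h3, show ¬("07-state-update.md" ∈ DECISIONS_DIFF_PHASE_FILES) from by decide, show ("07-state-update.md" ∈ STATE_DIFF_PHASE_FILES) from by decide, show ¬("07-state-update.md" ∈ MEMORY_DIFF_PHASE_FILES) from by decide]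
    by_cases h5 : fn = "08-memory-impact.md"
    · subst h5
      rw [get_phase_owned_actual_changed_files, get_phase_owned_actual_changed_files_alt]
      rw [pvLoop_eq_filter]
      simp only [pvAllPhaseFiles, pvDropEq, pvDropMemory, List.filter_filter, List.nil_append,
        String.reduceEq, List.contains_cons, List.elem_nil, Bool.or_false, Bool.true_or, Bool.false_or,
        beq_self_eq_true, reduceIte, Bool.not_true, Bool.not_false, ne_eq, not_true, not_false_iff,
        ite_true, ite_false]
      norm_num
      rw [if_neg (by decide : ¬("08-memory-impact.md" ∈ PRODUCT_DIFF_PHASE_FILES)),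
          if_pos (by decide : (("08-memory-impact.md" ∈ DECISIONS_DIFF_PHASE_FILES ∨ "08-memory-impact.md" ∈ STATE_DIFF_PHASE_FILES) ∨ "08-memory-impact.md" ∈ MEMORY_DIFF_PHASE_FILES))]
      congr 1
      apply List.filter_congr
      intro p _
      by_cases h1 : p = ".recursive/DECISIONS.md"
      · subst h1; decide
      · by_cases h2 : p = ".recursive/STATE.md"
        · subst h2; decide
        · by_cases h3 : PySem.Chars.startswith p.toList ['.','r','e','c','u','r','s','i','v','e','/','m','e','m','o','r','y','/'] = true <;>
            simp [h1, h2, h3, show ¬("08-memory-impact.md" ∈ DECISIONS_DIFF_PHASE_FILES) from by decide, show ¬("08-memory-impact.md" ∈ STATE_DIFF_PHASE_FILES) from by decide, show ("08-memory-impact.md" ∈ MEMORY_DIFF_PHASE_FILES) from by decide]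
    -- fn owns no phase (including "02-to-be-plan.md"): both sides return none
    have halt : get_phase_owned_actual_changed_files_alt fn (some files) = none := by
      rw [get_phase_owned_actual_changed_files_alt]
      simp [pvAllPhaseFiles, h0, h1, h2, h3, h4, h5]
    rw [halt, get_phase_owned_actual_changed_files]
    by_cases h02 : fn = "02-to-be-plan.md"
    · rw [if_pos h02]
    · rw [if_neg h02]
      simp only []
      rw [if_neg (by simp [PRODUCT_DIFF_PHASE_FILES, PySem.Set.mem_ofList, h0, h1, h2]),
          if_neg (by simp [DECISIONS_DIFF_PHASE_FILES, STATE_DIFF_PHASE_FILES, MEMORY_DIFF_PHASE_FILES,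
            PySem.Set.mem_union, PySem.Set.mem_ofList, h3, h4, h5])]
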